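-- pv_equiv track=rewrite | github.com/mraageshwari-cloud/takeHomeAssignment | VanityPython.py | generate_custom_vanity_numbers
-- ===== SOURCE A (Python) =====
-- import itertools
--
-- PHONE_MAP = {
--     "2": "ABC", "3": "DEF",
--     "4": "GHI", "5": "JKL",
--     "6": "MNO", "7": "PQRS",
--     "8": "TUV", "9": "WXYZ"
-- }
--
-- def generate_custom_vanity_numbers(phone_number, limit=5):
--     """
--     Generate fallback vanity numbers using digits-to-letters mapping.
--     Only maps the last 4 digits for performance.
--     """
--     # remove non-digits
--     digits = "".join([d for d in phone_number if d.isdigit()])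
--
--     # For simplicity we turn only the last 4 digits into letters
--     base = digits[:-7]
--     tail = digits[-7:]
--
--     # Build letter groups for last 4 digits
--     letter_groups = []
--     for d in tail:
--         if d in PHONE_MAP:
--             letter_groups.append(PHONE_MAP[d])
--         else:
--             letter_groups.append(d)
--
--     # Generate combinations
--     combos = itertools.product(*letter_groups)
--
--     results = []
--     for combo in combos:
--         vanity_tail = "".join(combo)
--         results.append(base + vanity_tail)
--         if len(results) >= limit:
--             break
--
--     return results
-- ===== SOURCE B (Python) =====
-- PHONE_MAP = {
--     "2": "ABC", "3": "DEF",
--     "4": "GHI", "5": "JKL",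
--     "6": "MNO", "7": "PQRS",
--     "8": "TUV", "9": "WXYZ"
-- }
--
-- def generate_custom_vanity_numbers(phone_number, limit=5):
--     digits = "".join(c for c in phone_number if c.isdigit())
--     base = digits[:-7]
--     tail = digits[-7:]
--     groups = [PHONE_MAP.get(d, d) for d in tail]
--     results = []
--
--     def backtrack(i, partial):
--         if i == len(groups):
--             results.append(base + partial)
--             return
--         for ch in groups[i]:
--             backtrack(i + 1, partial + ch)
--             if len(results) >= limit:
--                 return
--
--     backtrack(0, "")
--     return results
-- ===== Notes on version B (the rewrite author's own statement) =====
-- stated objective: alternative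
-- what changed: Replaces materializing the full itertools.product cartesian list and scanning it with a break-on-limit loop by a recursive backtracking walk over the letter groups that builds each combination incrementally and returns early once the limit is reached.
import Mathlib
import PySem

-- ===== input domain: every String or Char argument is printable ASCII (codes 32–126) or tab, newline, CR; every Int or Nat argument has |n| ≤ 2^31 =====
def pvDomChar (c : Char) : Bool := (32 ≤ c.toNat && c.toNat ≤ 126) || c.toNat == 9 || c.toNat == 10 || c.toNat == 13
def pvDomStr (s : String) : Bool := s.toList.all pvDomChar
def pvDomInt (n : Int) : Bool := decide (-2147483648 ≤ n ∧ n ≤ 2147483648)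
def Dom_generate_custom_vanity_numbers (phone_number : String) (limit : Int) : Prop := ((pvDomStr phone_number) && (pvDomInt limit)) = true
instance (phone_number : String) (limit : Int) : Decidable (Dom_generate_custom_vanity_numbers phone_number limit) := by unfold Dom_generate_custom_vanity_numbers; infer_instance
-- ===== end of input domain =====

-- B replaces A's itertools.product + break loop with a recursive backtracking walk over the
-- letter groups that appends results and short-circuits once the limit is reached (objective:
-- alternative decomposition; same preprocessing, same output).

-- ===== PORT A =====
-- PHONE_MAP lookup: the module-level literal dict (keys are single-character strings,
-- d is one character of tail), ported as a match on the known literal keys.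
def pvPhoneMap (d : Char) : Option (List Char) :=
  match d with
  | '2' => some ['A','B','C'] | '3' => some ['D','E','F']
  | '4' => some ['G','H','I'] | '5' => some ['J','K','L']
  | '6' => some ['M','N','O'] | '7' => some ['P','Q','R','S']
  | '8' => some ['T','U','V'] | '9' => some ['W','X','Y','Z']
  | _ => none

-- itertools.product(*letter_groups): leftmost factor varies slowest, exactly product's order.
def pvProd : List (List Char) → List (List Char)
  | [] => [[]]
  | g :: gs => g.flatMap (fun c => (pvProd gs).map (fun t => c :: t))

-- A's result loop: append base+"".join(combo), break when len(results) >= limit.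
def pvLoopA (base : List Char) (limit : Int) : List (List Char) → List String → List String
  | [], res => res
  | combo :: rest, res =>
      let res' := res ++ [String.ofList (base ++ combo)]
      if limit ≤ (res'.length : Int) then res' else pvLoopA base limit rest res'

def generate_custom_vanity_numbers (phone_number : String) (limit : Int) : List String :=
  let digits := phone_number.toList.filter PySem.Chars.isdigit
  let base := PySem.List.slice digits none (some (-7))
  let tail := PySem.List.slice digits (some (-7)) none
  let letter_groups := tail.foldl (fun acc d =>
    acc ++ [match pvPhoneMap d with | some g => g | none => [d]]) []
  let combos := pvProd letter_groups
  pvLoopA base limit combos []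

-- ===== PORT B =====
-- backtrack(i, partial): at the end of the groups emit base+partial; otherwise try each letter
-- of the current group, recursing, and return early once len(results) >= limit.
mutual
def pvBT (base : List Char) (limit : Int) : List (List Char) → List Char → List String → List String
  | [], part, res => res ++ [String.ofList (base ++ part)]
  | g :: gs, part, res => pvBTGroup base limit g gs part res
termination_by gs _ _ => sizeOf gs
decreasing_by all_goals (simp; try omega)
def pvBTGroup (base : List Char) (limit : Int) : List Char → List (List Char) → List Char → List String → List String
  | [], _, _, res => res
  | c :: cs, gs, part, res =>
      let res' := pvBT base limit gs (part ++ [c]) res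
      if limit ≤ (res'.length : Int) then res' else pvBTGroup base limit cs gs part res'
termination_by cs gs _ _ => sizeOf cs + sizeOf gs
decreasing_by all_goals (simp; try omega)
end


def generate_custom_vanity_numbers_alt (phone_number : String) (limit : Int) : List String :=
  let digits := phone_number.toList.filter PySem.Chars.isdigit
  let base := PySem.List.slice digits none (some (-7))
  let tail := PySem.List.slice digits (some (-7)) none
  let groups := tail.map (fun d => match pvPhoneMap d with | some g => g | none => [d])
  pvBT base limit groups [] []

-- ===== PRECONDITION & SPEC =====
def Spec_generate_custom_vanity_numbers (phone_number : String) (limit : Int) (out : List String) : Prop := out = generate_custom_vanity_numbers_alt phone_number limit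
instance (phone_number : String) (limit : Int) (out : List String) : Decidable (Spec_generate_custom_vanity_numbers phone_number limit out) := by unfold Spec_generate_custom_vanity_numbers; infer_instance

-- ===== CLAIM (what is proved, stated in full; the proofs are below) =====
def Claim_equal_generate_custom_vanity_numbers : Prop := ∀ (phone_number : String) (limit : Int), Dom_generate_custom_vanity_numbers phone_number limit → Spec_generate_custom_vanity_numbers phone_number limit (generate_custom_vanity_numbers phone_number limit)

-- ===== LEMMAS AND PROOFS =====

-- A's letter_groups loop (foldl with append) IS the map B uses.
theorem pvGroups_eq (tail : List Char) :
    tail.foldl (fun acc d =>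
      acc ++ [match pvPhoneMap d with | some g => g | none => [d]]) [] =
    tail.map (fun d => match pvPhoneMap d with | some g => g | none => [d]) := by
  simpa using PySem.List.foldl_append_singleton_eq_map
    (fun d => match pvPhoneMap d with | some g => g | none => [d]) tail []

-- A's loop over a concatenation: it enters L2 only if L1 did not reach the limit.
theorem pvLoopA_append (base : List Char) (limit : Int) (L1 L2 : List (List Char)) (res : List String) :
    pvLoopA base limit (L1 ++ L2) res =
      if limit ≤ ((pvLoopA base limit L1 res).length : Int) ∧ L1 ≠ [] then
        pvLoopA base limit L1 res
      else pvLoopA base limit L2 (pvLoopA base limit L1 res) := by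
  induction L1 generalizing res with
  | nil => simp [pvLoopA]
  | cons x xs ih =>
      simp only [List.cons_append, pvLoopA]
      rw [show (((res ++ [String.ofList (base ++ x)]).length : Nat) : Int) = (res.length : Int) + 1 by simp]
      by_cases h : limit ≤ (res.length : Int) + 1
      · simp [h]
      · rw [if_neg h, ih]
        by_cases hxs : xs = []
        · subst hxs; simp [pvLoopA, h]
        · simp [h, hxs]

-- Backtracking equals A's loop on the (shifted) product list.
theorem pvBT_eq (base : List Char) (limit : Int) :
    ∀ (gs : List (List Char)) (part : List Char) (res : List String),
      pvBT base limit gs part res =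
        pvLoopA base limit ((pvProd gs).map (fun t => part ++ t)) res := by
  intro gs
  induction gs with
  | nil =>
      intro part res
      simp [pvBT, pvProd, pvLoopA]
  | cons g gs ih =>
      intro part res
      have inner : ∀ (cs : List Char) (res : List String),
          pvBTGroup base limit cs gs part res =
            pvLoopA base limit
              (cs.flatMap (fun c => (pvProd gs).map (fun t => (part ++ [c]) ++ t))) res := by
        intro cs
        induction cs with
        | nil => intro res; simp [pvBTGroup, pvLoopA]
        | cons c cs ihc =>
            intro res
            simp only [pvBTGroup, List.flatMap_cons]
            rw [ih (part ++ [c]) res, pvLoopA_append]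
            simp only [List.append_assoc, List.singleton_append] at ihc ⊢
            by_cases h : limit ≤ ((pvLoopA base limit ((pvProd gs).map (fun t => part ++ c :: t)) res).length : Int)
            · by_cases hnil : pvProd gs = []
              · simp [hnil, pvLoopA, ihc, List.flatMap]
              · have hne : (pvProd gs).map (fun t => part ++ c :: t) ≠ [] := by
                  simpa using hnil
                simp [h, hne]
            · simp [h, ihc]
      rw [pvBT, inner]
      congr 1
      simp only [pvProd, List.map_flatMap, List.map_map]
      congr 1
      funext c
      congr 1
      funext t
      simp

-- ===== VERDICT (by name: the statement is the Claim_ definition above) =====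
theorem generate_custom_vanity_numbers_spec : Claim_equal_generate_custom_vanity_numbers := by
  intro phone_number limit _
  unfold Spec_generate_custom_vanity_numbers
  unfold generate_custom_vanity_numbers generate_custom_vanity_numbers_alt
  dsimp only
  rw [pvGroups_eq, pvBT_eq]
  simp
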